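-- pv_equiv track=rewrite | github.com/shazhe/algorithm-exercise-1 | algorithms_medium.py | compare_two_words
-- ===== SOURCE A (Python) =====
-- def compare_two_words(words, ordering):
--     if '' in words:
--         return True
--     else:
--         try:
--             first_index = ordering.index(words[0][0])
--             second_index = ordering.index(words[1][0])
--         except:
--             return False
--         if first_index > second_index:
--             return False
--         elif first_index == second_index:
--             return compare_two_words([w[1:] for w in words], ordering)
--         else:
--             return True
--
-- words = ['cc','cb','bb','ac']
-- ===== SOURCE B (Python) =====
-- def compare_two_words(words, ordering):
--     i = 0
--     while True:
--         if any(len(w) <= i for w in words):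
--             return True
--         if len(words) < 2:
--             return False
--         a = ordering.find(words[0][i])
--         b = ordering.find(words[1][i])
--         if a == -1 or b == -1:
--             return False
--         if a != b:
--             return a < b
--         i += 1
-- ===== Notes on version B (the rewrite author's own statement) =====
-- stated objective: alternative
-- what changed: Replaces A's recursion that re-slices every word ([w[1:] for w in words]) and rebuilds the list at each step with an index-based while loop that only advances a position counter and never copies a word.
import Mathlib
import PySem

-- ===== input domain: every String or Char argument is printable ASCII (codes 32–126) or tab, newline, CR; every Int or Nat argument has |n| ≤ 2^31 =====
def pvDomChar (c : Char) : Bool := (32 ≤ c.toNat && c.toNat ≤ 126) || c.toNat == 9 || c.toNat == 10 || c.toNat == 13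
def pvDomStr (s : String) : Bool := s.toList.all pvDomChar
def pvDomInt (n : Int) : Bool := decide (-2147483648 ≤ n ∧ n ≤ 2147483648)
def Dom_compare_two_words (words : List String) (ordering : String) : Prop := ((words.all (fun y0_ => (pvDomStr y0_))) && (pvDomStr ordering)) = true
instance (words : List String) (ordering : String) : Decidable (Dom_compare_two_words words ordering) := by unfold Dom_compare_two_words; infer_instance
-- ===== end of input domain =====

-- B replaces A's recursion-with-list-rebuilding by an index-based while loop that only advances a position counter and never copies a word (objective: alternative decomposition).


-- ===== PORT A =====
-- literal port of A: '' membership test, then try: ordering.index(words[0][0]) / ordering.index(words[1][0])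
-- (any IndexError/ValueError, i.e. any 'none' / find = -1 step, is the bare 'except: return False'),
-- then compare and recurse on [w[1:] for w in words].
def compare_two_words (words : List String) (ordering : String) : Bool :=
  if words.contains "" then true
  else
    match hg0 : PySem.List.pyGet? words 0 with
    | none => false            -- words[0] raised IndexError
    | some w0 =>
      match PySem.Str.pyGet? w0 0 with
      | none => false          -- words[0][0] raised IndexError
      | some c0 =>
        let first_index := PySem.Str.find ordering (String.ofList [c0])
        if first_index = -1 then false   -- ordering.index raised ValueError
        else
          match PySem.List.pyGet? words 1 with
          | none => false
          | some w1 =>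
            match PySem.Str.pyGet? w1 0 with
            | none => false
            | some c1 =>
              let second_index := PySem.Str.find ordering (String.ofList [c1])
              if second_index = -1 then false
              else if first_index > second_index then false
              else if first_index = second_index then
                compare_two_words (words.map (fun w => PySem.Str.slice w (some 1) none)) ordering
              else true
termination_by (words.map (fun w => w.toList.length)).sum
decreasing_by
  simp only [List.map_map, List.map_attach_eq_pmap, List.pmap_eq_map, Function.comp]
  have hne : ¬ words.contains "" = true := by assumption
  have hlen : ∀ w : String, (PySem.Str.slice w (some 1) none).toList.length = w.toList.length - 1 := by
    intro w
    simp [PySem.Str.toList_slice, PySem.Chars.slice_eq_listSlice,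
      PySem.List.slice_from_one, List.length_tail]
  have hpos : ∀ w ∈ words, 0 < w.toList.length := by
    intro w hw
    by_contra h
    have hw0 : w = "" := String.toList_inj.mp (by
      have : w.toList = [] := List.length_eq_zero_iff.mp (by omega)
      simp [this])
    subst hw0
    simp at hne
    exact hne hw
  have hw0m : w0 ∈ words := PySem.List.mem_of_pyGet?_eq_some _ hg0
  apply List.sum_lt_sum
  · intro w hw
    simp only [Function.comp_apply]
    rw [hlen]
    omega
  · exact ⟨w0, hw0m, by simp only [Function.comp_apply]; rw [hlen]; have := hpos w0 hw0m; omega⟩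

-- ===== PORT B =====
-- port of Source B: index-based while loop over position i; no word is ever copied.
def compare_two_words_altLoop (words : List String) (ordering : String) (i : Nat) : Bool :=
  if words.any (fun w => w.toList.length ≤ i) then true
  else
    match hm : words with
    | w0 :: w1 :: _ =>
      let a := PySem.Str.find ordering (String.ofList [w0.toList.getD i 'a'])
      let b := PySem.Str.find ordering (String.ofList [w1.toList.getD i 'a'])
      if a = -1 ∨ b = -1 then false
      else if a ≠ b then decide (a < b)
      else compare_two_words_altLoop words ordering (i + 1)
    | _ => false               -- len(words) < 2
termination_by (words.map (fun w => w.toList.length)).foldr max 0 - i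
decreasing_by
  rename_i hany tail hab heq
  subst hm
  have h0 : i < w0.toList.length := by
    simp only [List.any_cons, Bool.or_eq_true, decide_eq_true_eq] at hany
    omega
  have hle : w0.toList.length ≤ List.foldr max 0 (List.map (fun w => w.toList.length) (w0 :: w1 :: tail)) := by
    simp only [List.map_cons, List.foldr_cons]
    exact le_max_left _ _
  omega

def compare_two_words_alt (words : List String) (ordering : String) : Bool :=
  compare_two_words_altLoop words ordering 0

-- ===== PRECONDITION & SPEC =====
def Spec_compare_two_words (words : List String) (ordering : String) (out : Bool) : Prop := out = compare_two_words_alt words ordering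
instance (words : List String) (ordering : String) (out : Bool) : Decidable (Spec_compare_two_words words ordering out) := by unfold Spec_compare_two_words; infer_instance

-- ===== CLAIM (what is proved, stated in full; the proofs are below) =====
def Claim_equal_compare_two_words : Prop := ∀ (words : List String) (ordering : String), Dom_compare_two_words words ordering → Spec_compare_two_words words ordering (compare_two_words words ordering)

-- ===== LEMMAS AND PROOFS =====


lemma pv_contains_map_drop (words : List String) (i : Nat) :
    (words.map (fun w => String.ofList (w.toList.drop i))).contains "" =
      words.any (fun w => decide (w.toList.length ≤ i)) := by
  induction words with
  | nil => rfl
  | cons w ws ih =>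
    simp only [List.map_cons, List.contains_cons, List.any_cons, ih]
    congr 1
    rw [Bool.eq_iff_iff]
    simp [eq_comm (a := ("" : String)), ← String.toList_inj, List.drop_eq_nil_iff]

lemma pv_slice_ofList_drop (cs : List Char) (i : Nat) :
    PySem.Str.slice (String.ofList (cs.drop i)) (some 1) none = String.ofList (cs.drop (i + 1)) := by
  rw [← String.toList_inj]
  simp [PySem.Str.toList_slice, PySem.Chars.slice_eq_listSlice, PySem.List.slice_from_one,
    List.tail_drop]

lemma pv_A_step (ordering w0 w1 : String) (tail : List String) (i : Nat)
    (hall : ∀ w ∈ w0 :: w1 :: tail, i < w.toList.length) :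
    compare_two_words ((w0 :: w1 :: tail).map (fun w => String.ofList (w.toList.drop i))) ordering =
      (if PySem.Str.find ordering (String.ofList [w0.toList.getD i 'a']) = -1 then false
       else if PySem.Str.find ordering (String.ofList [w1.toList.getD i 'a']) = -1 then false
       else if PySem.Str.find ordering (String.ofList [w0.toList.getD i 'a']) >
           PySem.Str.find ordering (String.ofList [w1.toList.getD i 'a']) then false
       else if PySem.Str.find ordering (String.ofList [w0.toList.getD i 'a']) =
           PySem.Str.find ordering (String.ofList [w1.toList.getD i 'a']) then
         compare_two_words ((w0 :: w1 :: tail).map (fun w => String.ofList (w.toList.drop (i + 1)))) ordering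
       else true) := by
  have h0 := hall w0 (by simp)
  have h1 := hall w1 (by simp)
  have hc : ((w0 :: w1 :: tail).map (fun w => String.ofList (w.toList.drop i))).contains "" = false := by
    rw [pv_contains_map_drop]
    simp only [List.any_eq_false, decide_eq_true_eq]
    intro w hw
    have := hall w hw
    omega
  have hp0 : PySem.List.pyGet? ((w0 :: w1 :: tail).map (fun w => String.ofList (w.toList.drop i))) 0
      = some (String.ofList (w0.toList.drop i)) := by
    simp [List.map_cons, PySem.List.pyGet?_zero_cons]
  have hp1 : PySem.List.pyGet? ((w0 :: w1 :: tail).map (fun w => String.ofList (w.toList.drop i))) 1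
      = some (String.ofList (w1.toList.drop i)) := by
    simp [PySem.List.pyGet?, PySem.List.pyIdx?]
  have hch0 : PySem.Str.pyGet? (String.ofList (w0.toList.drop i)) 0 = some (w0.toList.getD i 'a') := by
    have h0' : i < w0.length := by simpa using h0
    simp [List.getElem?_drop, List.getD_eq_getElem?_getD, PySem.List.pyGet?, PySem.List.pyIdx?,
      Nat.sub_pos_of_lt h0', List.getElem?_eq_getElem h0]
  have hch1 : PySem.Str.pyGet? (String.ofList (w1.toList.drop i)) 0 = some (w1.toList.getD i 'a') := by
    have h1' : i < w1.length := by simpa using h1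
    simp [List.getElem?_drop, List.getD_eq_getElem?_getD, PySem.List.pyGet?, PySem.List.pyIdx?,
      Nat.sub_pos_of_lt h1', List.getElem?_eq_getElem h1]
  have hrec : ((w0 :: w1 :: tail).map (fun w => String.ofList (w.toList.drop i))).map
        (fun w => PySem.Str.slice w (some 1) none)
      = (w0 :: w1 :: tail).map (fun w => String.ofList (w.toList.drop (i + 1))) := by
    rw [List.map_map]
    apply List.map_congr_left
    intro w _
    exact pv_slice_ofList_drop w.toList i
  rw [compare_two_words.eq_def, hp0, hp1]
  simp only [hc, Bool.false_eq_true, if_false, hch0, hch1, hrec]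

lemma altLoop_eq_compare (ordering : String) (words : List String) (i : Nat) :
    compare_two_words_altLoop words ordering i =
      compare_two_words (words.map (fun w => String.ofList (w.toList.drop i))) ordering := by
  fun_induction compare_two_words_altLoop words ordering i with
  | case1 j h =>
    rw [compare_two_words.eq_def]
    have hc : (List.map (fun w => String.ofList (List.drop j w.toList)) words).contains "" = true := by
      rw [pv_contains_map_drop]; exact h
    rw [if_pos hc]
  | case2 j hany w0 w1 tail hm av bv h =>
    subst hm
    have hall : ∀ w ∈ w0 :: w1 :: tail, j < w.toList.length := by
      intro w hw
      by_contra hcon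
      refine hany (List.any_eq_true.mpr ⟨w, hw, ?_⟩)
      simp only [decide_eq_true_eq]
      omega
    have h' : PySem.Str.find ordering (String.ofList [w0.toList.getD j 'a']) = -1 ∨ PySem.Str.find ordering (String.ofList [w1.toList.getD j 'a']) = -1 := h
    rw [pv_A_step ordering w0 w1 tail j hall]
    split_ifs with h1 h2 h3 h4 <;> first | rfl | (exfalso; omega)
  | case3 j hany w0 w1 tail hm av bv hne h =>
    subst hm
    have hall : ∀ w ∈ w0 :: w1 :: tail, j < w.toList.length := by
      intro w hw
      by_contra hcon
      refine hany (List.any_eq_true.mpr ⟨w, hw, ?_⟩)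
      simp only [decide_eq_true_eq]
      omega
    have hne' : ¬(PySem.Str.find ordering (String.ofList [w0.toList.getD j 'a']) = -1 ∨ PySem.Str.find ordering (String.ofList [w1.toList.getD j 'a']) = -1) := hne
    have hab : PySem.Str.find ordering (String.ofList [w0.toList.getD j 'a']) ≠ PySem.Str.find ordering (String.ofList [w1.toList.getD j 'a']) := h
    rw [pv_A_step ordering w0 w1 tail j hall]
    show (decide (PySem.Str.find ordering (String.ofList [w0.toList.getD j 'a']) < PySem.Str.find ordering (String.ofList [w1.toList.getD j 'a']))) = _
    split_ifs with h1 h2 h3 h4 <;>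
      first
        | (exfalso; omega)
        | (simp only [decide_eq_false_iff_not]; omega)
        | (simp only [decide_eq_true_eq]; omega)
  | case4 j hany w0 w1 tail hm av bv hne heq ih1 =>
    subst hm
    have hall : ∀ w ∈ w0 :: w1 :: tail, j < w.toList.length := by
      intro w hw
      by_contra hcon
      refine hany (List.any_eq_true.mpr ⟨w, hw, ?_⟩)
      simp only [decide_eq_true_eq]
      omega
    have hne' : ¬(PySem.Str.find ordering (String.ofList [w0.toList.getD j 'a']) = -1 ∨ PySem.Str.find ordering (String.ofList [w1.toList.getD j 'a']) = -1) := hne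
    have heq' : PySem.Str.find ordering (String.ofList [w0.toList.getD j 'a']) = PySem.Str.find ordering (String.ofList [w1.toList.getD j 'a']) := not_ne_iff.mp heq
    rw [pv_A_step ordering w0 w1 tail j hall]
    split_ifs with h1 h2 h3 h4 <;> first | exact ih1 | (exfalso; omega)
  | case5 j hany hnc =>
    match words, hnc with
    | [], _ =>
      rw [compare_two_words.eq_def]
      simp [PySem.List.pyGet?, PySem.List.pyIdx?]
    | [w], _ =>
      have hw : j < w.toList.length := by
        by_contra hcon
        refine hany (List.any_eq_true.mpr ⟨w, by simp, ?_⟩)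
        simp only [decide_eq_true_eq]
        omega
      have hc : (List.map (fun w => String.ofList (List.drop j w.toList)) [w]).contains "" = false := by
        rw [pv_contains_map_drop]
        simp only [List.any_cons, List.any_nil, Bool.or_false, decide_eq_false_iff_not]
        omega
      have hp1 : PySem.List.pyGet? [String.ofList (List.drop j w.toList)] 1 = none := by
        simp [PySem.List.pyGet?, PySem.List.pyIdx?]
      have hw' : j < w.length := by
        rw [← String.length_toList]
        exact hw
      have hch : PySem.Str.pyGet? (String.ofList (List.drop j w.toList)) 0 = some (w.toList.getD j 'a') := by
        simp [List.getElem?_drop, List.getD_eq_getElem?_getD, PySem.List.pyGet?, PySem.List.pyIdx?,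
          Nat.sub_pos_of_lt hw', List.getElem?_eq_getElem hw]
      rw [compare_two_words.eq_def,
        if_neg (show ¬ ((List.map (fun w => String.ofList (List.drop j w.toList)) [w]).contains "" = true) by simp; omega)]
      simp only [List.map_cons, List.map_nil]
      rw [PySem.List.pyGet?_zero_cons]
      simp only [hch, hp1]
      split_ifs <;> rfl
    | w0 :: w1 :: tail, hnc => exact absurd rfl (hnc w0 w1 tail)

-- ===== VERDICT (by name: the statement is the Claim_ definition above) =====
theorem compare_two_words_spec : Claim_equal_compare_two_words := by
  intro words ordering _
  unfold Spec_compare_two_words compare_two_words_alt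
  rw [altLoop_eq_compare]
  have h : words.map (fun w => String.ofList (w.toList.drop 0)) = words := by simp
  rw [h]
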